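-- pv_equiv track=rewrite | github.com/AgentRichard/LLM_Delivery | CBOW/data.py | raw_train_dataset
-- ===== SOURCE A (Python) =====
-- def raw_train_dataset(sentences, window_size):
--     '''未独热编码的训练集 [( ,[]), ...], window_size是控制当前单词左右关注多少个单词，设置的越大计算量越高，但是上下文语义了解的越好'''
--     dataset = []
--     for sentence in sentences:
--         sentence = sentence.split(" ")
--         for _index, word in enumerate(sentence):
--             otherwords = sentence[max(_index - window_size, 0) : _index] + \
--                         sentence[_index+1 : min(len(sentence), _index + window_size + 1)]
--             dataset.append((word, otherwords))
--     return dataset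
-- ===== SOURCE B (Python) =====
-- def raw_train_dataset(sentences, window_size):
--     def sentence_pairs(words):
--         return [(word,
--                  [w for j, w in enumerate(words)
--                   if j != i and abs(j - i) <= window_size])
--                 for i, word in enumerate(words)]
--     return [pair for sentence in sentences
--             for pair in sentence_pairs(sentence.split(" "))]
-- ===== Notes on version B (the rewrite author's own statement) =====
-- stated objective: alternative
-- what changed: B replaces A's two clamped slices plus concatenation by filtering the full enumerated sentence with a distance predicate abs(j-i) <= window_size, and builds the result as nested comprehensions (flatMap of per-sentence maps) instead of A's append-accumulator loops.
import Mathlib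
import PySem

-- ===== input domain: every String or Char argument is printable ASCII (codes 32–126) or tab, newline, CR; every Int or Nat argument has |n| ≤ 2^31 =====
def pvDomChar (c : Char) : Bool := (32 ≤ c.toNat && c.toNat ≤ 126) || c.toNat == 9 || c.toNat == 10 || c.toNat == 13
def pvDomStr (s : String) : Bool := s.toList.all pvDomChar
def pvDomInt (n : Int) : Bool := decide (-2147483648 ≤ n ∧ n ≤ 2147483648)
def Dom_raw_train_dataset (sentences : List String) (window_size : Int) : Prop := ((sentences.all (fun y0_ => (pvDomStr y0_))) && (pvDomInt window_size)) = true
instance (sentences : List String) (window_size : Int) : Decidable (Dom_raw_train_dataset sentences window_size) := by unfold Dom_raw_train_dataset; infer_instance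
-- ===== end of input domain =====

-- B builds contexts by filtering the enumerated sentence with a distance predicate |j-i| ≤ window_size
-- (nested comprehensions) instead of A's two clamped slices accumulated by appends (alternative decomposition).

-- ===== PORT A =====
-- sentence.split(" "): the separator is the nonempty literal " ", so PySem.Str.split? never returns none; .getD [] is exact.
def raw_train_dataset (sentences : List String) (window_size : Int) : List (String × List String) :=
  sentences.foldl (fun dataset sentence =>
    let words := (PySem.Str.split? sentence " ").getD []
    (PySem.List.enumerate words).foldl (fun dataset iw =>
      let otherwords :=
        PySem.List.slice words (some (max (iw.1 - window_size) 0)) (some iw.1) ++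
        PySem.List.slice words (some (iw.1 + 1)) (some (min ((words.length : Int)) (iw.1 + window_size + 1)))
      dataset ++ [(iw.2, otherwords)]) dataset) []

-- ===== PORT B =====
-- helper sentence_pairs(words): the inner comprehension filters enumerate(words) by j != i and abs(j-i) <= window_size
def rtd_sentence_pairs (words : List String) (window_size : Int) : List (String × List String) :=
  (PySem.List.enumerate words).map (fun iw =>
    (iw.2, ((PySem.List.enumerate words).filter
              (fun jw => decide (jw.1 ≠ iw.1 ∧ |jw.1 - iw.1| ≤ window_size))).map (·.2)))

def raw_train_dataset_alt (sentences : List String) (window_size : Int) : List (String × List String) :=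
  sentences.flatMap (fun sentence => rtd_sentence_pairs ((PySem.Str.split? sentence " ").getD []) window_size)

-- ===== PRECONDITION & SPEC =====
-- Pre_ excludes negative window_size — outside the function's natural domain (a window size is a count);
-- there A's second slice can wrap through Python's negative-index rule and return accidental context words.
def Pre_raw_train_dataset (sentences : List String) (window_size : Int) : Prop := 0 ≤ window_size
instance (sentences : List String) (window_size : Int) : Decidable (Pre_raw_train_dataset sentences window_size) := by unfold Pre_raw_train_dataset; infer_instance
def pvWitness_raw_train_dataset : List String × Int := (["a b c", "d"], 1)

def Spec_raw_train_dataset (sentences : List String) (window_size : Int) (out : List (String × List String)) : Prop := out = raw_train_dataset_alt sentences window_size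
instance (sentences : List String) (window_size : Int) (out : List (String × List String)) : Decidable (Spec_raw_train_dataset sentences window_size out) := by unfold Spec_raw_train_dataset; infer_instance

-- ===== CLAIM (what is proved, stated in full; the proofs are below) =====
def Claim_equal_raw_train_dataset : Prop := ∀ (sentences : List String) (window_size : Int), Dom_raw_train_dataset sentences window_size → Pre_raw_train_dataset sentences window_size → Spec_raw_train_dataset sentences window_size (raw_train_dataset sentences window_size)

-- ===== LEMMAS AND PROOFS =====

-- map of pyGetD over an index range is a slice, for in-bounds ascending bounds
theorem map_pyGetD_range_eq_slice (words : List String) (a b : Int)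
    (h0 : 0 ≤ a) (hab : a ≤ b) (hb : b ≤ (words.length : Int)) :
    (PySem.List.pyRange a b 1).map (fun j => PySem.List.pyGetD words j "") =
      PySem.List.slice words (some a) (some b) := by
  rw [PySem.List.slice_toNat _ h0 (le_trans h0 hab), PySem.List.pyRange_one]
  rw [List.map_map]
  apply List.ext_getElem
  · simp
    omega
  · intro k hk1 hk2
    simp at hk1 ⊢
    rw [PySem.List.pyGetD_eq_getElem _ _ (by omega : (0:Int) ≤ a + k) (by omega)]
    congr 1
    omega

-- B's distance filter over the enumerated sentence equals A's two clamped slices (window ≥ 0, index in range)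
theorem ctx_eq (words : List String) (w i : Int) (hw : 0 ≤ w)
    (hi : 0 ≤ i) (hin : i < (words.length : Int)) :
    ((PySem.List.enumerate words).filter
        (fun jw => decide (jw.1 ≠ i ∧ |jw.1 - i| ≤ w))).map (·.2) =
      PySem.List.slice words (some (max (i - w) 0)) (some i) ++
      PySem.List.slice words (some (i + 1)) (some (min ((words.length : Int)) (i + w + 1))) := by
  rw [PySem.List.enumerate_eq_map_pyRange words ""]
  rw [List.filter_map, List.map_map]
  have hcomp : ((fun jw : Int × String => decide (jw.1 ≠ i ∧ |jw.1 - i| ≤ w)) ∘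
      (fun j => (j, PySem.List.pyGetD words j ""))) = fun j => decide (j ≠ i ∧ |j - i| ≤ w) := by
    funext j; rfl
  rw [hcomp]
  have hfun : ((fun x : Int × String => x.2) ∘ (fun j => (j, PySem.List.pyGetD words j ""))) =
      fun j => PySem.List.pyGetD words j "" := by
    funext j; rfl
  rw [hfun]
  have hlen : PySem.List.len words = (words.length : Int) := by simp [PySem.List.len_eq]
  rw [hlen]
  rw [PySem.List.pyRange_one_append 0 (max (i - w) 0) ((words.length : Int)) (by omega) (by omega)]
  rw [PySem.List.pyRange_one_append (max (i - w) 0) i ((words.length : Int)) (by omega) (by omega)]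
  rw [PySem.List.pyRange_one_append i (i+1) ((words.length : Int)) (by omega) (by omega)]
  rw [PySem.List.pyRange_one_append (i+1) (min ((words.length : Int)) (i + w + 1)) ((words.length : Int)) (by omega) (by omega)]
  rw [PySem.List.pyRange_one_singleton i]
  simp only [List.filter_append]
  have hfalse_lo : List.filter (fun j => decide (j ≠ i ∧ |j - i| ≤ w)) (PySem.List.pyRange 0 (max (i - w) 0) 1) = [] := by
    rw [List.filter_eq_nil_iff]
    intro j hj
    rw [PySem.List.mem_pyRange_one] at hj
    simp [abs_le]
    omega
  have htrue_lo : List.filter (fun j => decide (j ≠ i ∧ |j - i| ≤ w)) (PySem.List.pyRange (max (i - w) 0) i 1) = PySem.List.pyRange (max (i - w) 0) i 1 := by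
    rw [List.filter_eq_self]
    intro j hj
    rw [PySem.List.mem_pyRange_one] at hj
    simp [abs_le]
    omega
  have hself : List.filter (fun j => decide (j ≠ i ∧ |j - i| ≤ w)) [i] = [] := by simp
  have htrue_hi : List.filter (fun j => decide (j ≠ i ∧ |j - i| ≤ w)) (PySem.List.pyRange (i+1) (min ((words.length : Int)) (i + w + 1)) 1) = PySem.List.pyRange (i+1) (min ((words.length : Int)) (i + w + 1)) 1 := by
    rw [List.filter_eq_self]
    intro j hj
    rw [PySem.List.mem_pyRange_one] at hj
    simp [abs_le]
    omega
  have hfalse_hi : List.filter (fun j => decide (j ≠ i ∧ |j - i| ≤ w)) (PySem.List.pyRange (min ((words.length : Int)) (i + w + 1)) ((words.length : Int)) 1) = [] := by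
    rw [List.filter_eq_nil_iff]
    intro j hj
    rw [PySem.List.mem_pyRange_one] at hj
    simp [abs_le]
    omega
  rw [hfalse_lo, htrue_lo, hself, htrue_hi, hfalse_hi]
  simp only [List.nil_append, List.append_nil, List.map_append]
  rw [map_pyGetD_range_eq_slice words (max (i - w) 0) i (by omega) (by omega) (by omega)]
  rw [map_pyGetD_range_eq_slice words (i+1) (min ((words.length : Int)) (i + w + 1)) (by omega) (by omega) (by omega)]

-- an element of enumerate carries an in-range index
theorem fst_enumerate_bounds {α : Type} (xs : List α) (iw : Int × α)
    (h : iw ∈ PySem.List.enumerate xs) : 0 ≤ iw.1 ∧ iw.1 < (xs.length : Int) := by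
  have h2 := List.mem_map_of_mem (f := Prod.fst) h
  rw [PySem.List.map_fst_enumerate, PySem.List.mem_pyRange_one] at h2
  omega

-- ===== VERDICT (by name: the statement is the Claim_ definition above) =====
theorem raw_train_dataset_spec : Claim_equal_raw_train_dataset := by
  intro sentences window_size _ hw
  unfold Spec_raw_train_dataset raw_train_dataset raw_train_dataset_alt
  rw [← List.nil_append (sentences.flatMap _), ← PySem.List.foldl_append_eq_flatMap]
  apply PySem.List.foldl_congr_mem
  intro dataset sentence _
  simp only
  rw [rtd_sentence_pairs, ← PySem.List.foldl_append_singleton_eq_map]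
  apply PySem.List.foldl_congr_mem
  intro acc iw hmem
  have hb := fst_enumerate_bounds _ _ hmem
  congr 2
  exact congrArg (Prod.mk iw.2) (ctx_eq _ window_size iw.1 hw hb.1 hb.2).symm
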